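-- pv_equiv track=rewrite | github.com/blacksmithalex/ege_computer_science | КЕГЭ/16/99.py | F
-- ===== SOURCE A (Python) =====
-- def F(n):
--     if n == 0:
--         return 1
--     elif n == 1:
--         return 3
--     elif n == 2:
--         return 2
--     else:
--         return F(n - 1) * F(n - 3)
-- ===== SOURCE B (Python) =====
-- def F(n):
--     if n < 3:
--         return (1, 3, 2)[n]
--     a, b, c = 1, 3, 2
--     for _ in range(n - 2):
--         a, b, c = b, c, c * a
--     return c
-- ===== Notes on version B (the rewrite author's own statement) =====
-- stated objective: alternative
-- what changed: Replaced A's exponential double recursion by a bottom-up loop carrying the last three sequence values; B performs linearly many multiplications, though the doubly-exponentially large integer results dominate runtime for large n.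
import Mathlib
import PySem

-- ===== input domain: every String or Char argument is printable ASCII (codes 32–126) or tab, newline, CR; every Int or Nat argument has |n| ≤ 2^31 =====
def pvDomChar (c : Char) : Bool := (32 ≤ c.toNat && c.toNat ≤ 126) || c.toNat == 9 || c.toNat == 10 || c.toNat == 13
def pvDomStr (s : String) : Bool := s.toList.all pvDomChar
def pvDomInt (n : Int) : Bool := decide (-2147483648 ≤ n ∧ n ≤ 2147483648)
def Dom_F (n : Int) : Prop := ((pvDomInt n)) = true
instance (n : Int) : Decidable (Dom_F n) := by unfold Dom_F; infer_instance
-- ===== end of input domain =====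

-- B replaces A's exponential double recursion by a bottom-up loop carrying the last three values (objective: alternative).


-- ===== PORT A =====
-- literal transliteration of A's recursion; the 'n < 0' guard only makes the
-- recursion total (Python recurses forever there; such n are outside Pre_F)
def F (n : Int) : Int :=
  if n = 0 then 1
  else if n = 1 then 3
  else if n = 2 then 2
  else if n < 0 then 0
  else F (n - 1) * F (n - 3)
termination_by n.toNat
decreasing_by all_goals omega

-- ===== PORT B =====
-- one loop step: (a, b, c) ↦ (b, c, c * a)
def F_step (s : Int × Int × Int) : Int × Int × Int := (s.2.1, s.2.2, s.2.2 * s.1)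

def F_alt (n : Int) : Int :=
  if n < 3 then (PySem.List.pyGet? [(1 : Int), 3, 2] n).getD 0  -- Python tuple index (negative wraps; none = IndexError, outside Pre_)
  else
    ((List.range (n - 2).toNat).foldl (fun s _ => F_step s) (1, 3, 2)).2.2

-- ===== PRECONDITION & SPEC =====
-- Pre_F excludes n < 0, on which Python's A recurses forever (RecursionError).
def Pre_F (n : Int) : Prop := 0 ≤ n
instance (n : Int) : Decidable (Pre_F n) := by unfold Pre_F; infer_instance
def pvWitness_F : Int := 5
def Spec_F (n : Int) (out : Int) : Prop := out = F_alt n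
instance (n : Int) (out : Int) : Decidable (Spec_F n out) := by unfold Spec_F; infer_instance

-- ===== CLAIM (what is proved, stated in full; the proofs are below) =====
def Claim_equal_F : Prop := ∀ (n : Int), Dom_F n → Pre_F n → Spec_F n (F n)

-- ===== LEMMAS AND PROOFS =====

theorem F_rec (n : Int) (h : 3 ≤ n) : F n = F (n - 1) * F (n - 3) := by
  rw [F]
  have h0 : ¬ n = 0 := by omega
  have h1 : ¬ n = 1 := by omega
  have h2 : ¬ n = 2 := by omega
  have h3 : ¬ n < 0 := by omega
  simp [h0, h1, h2, h3]

-- loop invariant: after k steps the state carries (F k, F (k+1), F (k+2))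
theorem F_loop (k : Nat) :
    (List.range k).foldl (fun s _ => F_step s) (1, 3, 2) =
      (F k, F (k + 1), F (k + 2)) := by
  induction k with
  | zero => simp [F]
  | succ m ih =>
      rw [List.range_succ, List.foldl_append, ih]
      simp only [List.foldl_cons, List.foldl_nil, F_step]
      have h : F ((m : Int) + 3) = F ((m : Int) + 2) * F (m : Int) := by
        have := F_rec ((m : Int) + 3) (by omega)
        simpa [show (m : Int) + 3 - 1 = (m : Int) + 2 by ring,
               show (m : Int) + 3 - 3 = (m : Int) by ring] using this
      push_cast
      rw [show ((m : Int) + 1 + 1) = (m : Int) + 2 by ring,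
          show ((m : Int) + 1 + 2) = (m : Int) + 3 by ring, h]

-- ===== VERDICT (by name: the statement is the Claim_ definition above) =====
theorem F_spec : Claim_equal_F := by
  intro n _ hpre
  unfold Spec_F F_alt
  unfold Pre_F at hpre
  by_cases h3 : n < 3
  · interval_cases n <;> simp [F, PySem.List.pyGet?, PySem.List.pyIdx?]
  · rw [F_loop ((n - 2).toNat)]
    simp only
    have he : ((((n - 2).toNat : Int)) + 2) = n := by omega
    rw [he, if_neg h3]
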